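-- pv_equiv track=rewrite | github.com/kitakou0313/cracking-the-code-interview | cracking-the-code-interview/chap16_18.py | findMatchingPatterns
-- ===== SOURCE A (Python) =====
-- import copy
--
-- def findMatchingPatterns(string, pattern):
--     def normalizePattern(pattern):
--         if pattern[0] == "a":
--             return pattern
--         else:
--             normalizedP = ""
--             for p in pattern:
--                 normalizedP += "a" if p == "b" else "b"
--             return normalizedP
--
--     pattern = list(normalizePattern(pattern))
--
--     aCount = 0
--     bCount = 0
--     for p in pattern:
--         if p == "a":
--             aCount += 1
--         else:
--             bCount += 1
--
--     for aLength in range(1, len(string) // aCount + 1):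
--         bLength = (len(string) - aCount *
--                    aLength)//bCount if bCount != 0 else 0
--         aPattern = string[:aLength]
--         bPattern = ""
--         nowInd = 0
--         nowPattern = copy.deepcopy(pattern)
--         while nowInd < len(string):
--             p = nowPattern.pop(0)
--             if p == "a":
--                 if aPattern == string[nowInd:nowInd + aLength]:
--                     nowInd += aLength
--                     if len(nowPattern) == 0:
--                         return True
--                 else:
--                     break
--             else:
--                 if bLength != 0 and bPattern == "":
--                     bPattern = string[nowInd:nowInd + bLength]
--                     nowInd += bLength
--                     if len(nowPattern) == 0:
--                         return True
--                 else:
--                     if bPattern == string[nowInd:nowInd + bLength]: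
--                         nowInd += bLength
--                         if len(nowPattern) == 0:
--                             return True
--                     else:
--                         break
--
--     return False
-- ===== SOURCE B (Python) =====
-- def findMatchingPatterns(string, pattern):
--     # normalize so the pattern starts with 'a' (same flip rule as the task: 'b'->'a', anything else->'b')
--     if pattern[0] != "a":
--         pattern = "".join("a" if c == "b" else "b" for c in pattern)
--     aCount = pattern.count("a")
--     bCount = len(pattern) - aCount
--     n = len(string)
--     for aLength in range(1, n // aCount + 1):
--         bLength = (n - aCount * aLength) // bCount if bCount else 0
--         # closed-form chunk offsets: no pattern simulation, no mutable pattern copy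
--         offs, acnt, bcnt = [], 0, 0
--         for p in pattern:
--             offs.append(aLength * acnt + bLength * bcnt)
--             if p == "a":
--                 acnt += 1
--             else:
--                 bcnt += 1
--         if offs[-1] >= n:
--             continue
--         aPat = string[:aLength]
--         firstB = next((o for p, o in zip(pattern, offs) if p != "a"), None)
--         bPat = "" if firstB is None else string[firstB:firstB + bLength]
--         if all(string[o:o + aLength] == aPat if p == "a" else string[o:o + bLength] == bPat
--                for p, o in zip(pattern, offs)):
--             return True
--     return False
-- ===== Notes on version B (the rewrite author's own statement) =====
-- stated objective: alternative
-- what changed: B replaces A's per-candidate simulation (deepcopy of the pattern, pop(0) per step, bPattern state machine) by computing each chunk's offset in closed form from prefix a/b counts and comparing every chunk against the fixed prefix chunk and first-b chunk.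
import Mathlib
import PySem

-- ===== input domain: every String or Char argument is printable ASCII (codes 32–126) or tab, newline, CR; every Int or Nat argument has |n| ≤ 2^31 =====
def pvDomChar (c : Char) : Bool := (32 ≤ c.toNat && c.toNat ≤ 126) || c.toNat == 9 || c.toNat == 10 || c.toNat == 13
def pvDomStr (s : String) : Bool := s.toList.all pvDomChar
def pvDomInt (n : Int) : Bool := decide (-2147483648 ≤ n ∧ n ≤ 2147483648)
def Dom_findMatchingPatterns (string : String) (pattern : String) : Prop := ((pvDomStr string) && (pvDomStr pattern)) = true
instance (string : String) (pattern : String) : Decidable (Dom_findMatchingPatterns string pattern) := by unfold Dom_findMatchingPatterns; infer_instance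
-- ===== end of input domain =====

-- B replaces A's per-candidate pattern simulation (deepcopy + pop(0) + bPattern state machine)
-- by closed-form chunk offsets checked against fixed prefix/first-b chunks; equal return values on Pre_.

-- s[i:i+l] for natural i, l: exact by PySem.List.slice_natCast_add
def pyChunk (s : List Char) (i l : Nat) : List Char := (s.drop i).take l

-- ===== PORT A =====
-- normalizedP built by string concatenation in a loop, as in A
def flipAcc (pattern : List Char) : List Char :=
  pattern.foldl (fun acc p => acc ++ [if p = 'b' then 'a' else 'b']) []

def normalizeA (pattern : List Char) : List Char :=
  if pattern.head? = some 'a' then pattern else flipAcc pattern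

-- the while loop: nowPattern is consumed from the front (pop(0)); Python would raise on an
-- empty nowPattern with nowInd < len(string) — that state is unreachable from the port's calls
def loopA (s : List Char) (aLen bLen : Nat) (aPat : List Char) :
    List Char → Nat → List Char → Bool
  | [], _, _ => false
  | p :: rest, i, bPat =>
    if i < s.length then
      if p = 'a' then
        if pyChunk s i aLen = aPat then
          if rest = [] then true else loopA s aLen bLen aPat rest (i + aLen) bPat
        else false
      else
        if bLen ≠ 0 ∧ bPat = [] then
          if rest = [] then true else loopA s aLen bLen aPat rest (i + bLen) (pyChunk s i bLen)
        else
          if pyChunk s i bLen = bPat then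
            if rest = [] then true else loopA s aLen bLen aPat rest (i + bLen) bPat
          else false
    else false

def findMatchingPatterns (string : String) (pattern : String) : Bool :=
  let s := string.toList
  let q := normalizeA pattern.toList
  let counts := q.foldl (fun (c : Nat × Nat) p => if p = 'a' then (c.1 + 1, c.2) else (c.1, c.2 + 1)) (0, 0)
  let aCount := counts.1
  let bCount := counts.2
  -- range(1, len(string) // aCount + 1); the for-loop with `return True` is an `any`
  (List.range' 1 (s.length / aCount)).any fun aLen =>
    let bLen := if bCount ≠ 0 then (s.length - aCount * aLen) / bCount else 0
    loopA s aLen bLen (pyChunk s 0 aLen) q 0 []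

-- ===== PORT B =====
def flipB (pattern : List Char) : List Char :=
  pattern.map (fun c => if c = 'b' then 'a' else 'b')

def normalizeB (pattern : List Char) : List Char :=
  if pattern.head? = some 'a' then pattern else flipB pattern

-- closed-form chunk offsets: offs[k] = aLen * (#'a' before k) + bLen * (#non-'a' before k)
def offsB (aLen bLen : Nat) (q : List Char) : List Nat :=
  (q.foldl (fun (st : List Nat × Nat × Nat) p =>
      (st.1 ++ [aLen * st.2.1 + bLen * st.2.2],
       if p = 'a' then st.2.1 + 1 else st.2.1,
       if p = 'a' then st.2.2 else st.2.2 + 1))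
    ([], 0, 0)).1

def checkB (s q : List Char) (aLen bLen : Nat) : Bool :=
  let offs := offsB aLen bLen q
  match offs.getLast? with
  | none => false   -- offs[-1] on an empty pattern: unreachable (the range is empty when aCount = 0)
  | some last =>
    if s.length ≤ last then false
    else
      let aPat := pyChunk s 0 aLen
      let bPat := match (q.zip offs).find? (fun po => po.1 ≠ 'a') with
                  | none => []
                  | some po => pyChunk s po.2 bLen
      (q.zip offs).all fun po =>
        if po.1 = 'a' then decide (pyChunk s po.2 aLen = aPat) else decide (pyChunk s po.2 bLen = bPat)

def findMatchingPatterns_alt (string : String) (pattern : String) : Bool :=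
  let s := string.toList
  let q := normalizeB pattern.toList
  let aCount := q.count 'a'
  let bCount := q.length - aCount
  (List.range' 1 (s.length / aCount)).any fun aLen =>
    let bLen := if bCount ≠ 0 then (s.length - aCount * aLen) / bCount else 0
    checkB s q aLen bLen

-- ===== PRECONDITION & SPEC =====
-- Pre_ excludes exactly the inputs where Python A raises: IndexError on pattern == "" and
-- ZeroDivisionError when the normalized pattern contains no 'a' (pattern[0] != 'a' and 'b' not in pattern).
def Pre_findMatchingPatterns (string : String) (pattern : String) : Prop :=
  pattern.toList ≠ [] ∧ (pattern.toList.head? = some 'a' ∨ 'b' ∈ pattern.toList)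
instance (string : String) (pattern : String) : Decidable (Pre_findMatchingPatterns string pattern) := by
  unfold Pre_findMatchingPatterns; infer_instance

def pvWitness_findMatchingPatterns : String × String := ("catcatgocatgo", "aabab")

def Spec_findMatchingPatterns (string : String) (pattern : String) (out : Bool) : Prop := out = findMatchingPatterns_alt string pattern
instance (string : String) (pattern : String) (out : Bool) : Decidable (Spec_findMatchingPatterns string pattern out) := by unfold Spec_findMatchingPatterns; infer_instance

-- ===== CLAIM (what is proved, stated in full; the proofs are below) =====
def Claim_equal_findMatchingPatterns : Prop := ∀ (string : String) (pattern : String), Dom_findMatchingPatterns string pattern → Pre_findMatchingPatterns string pattern → Spec_findMatchingPatterns string pattern (findMatchingPatterns string pattern)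

-- ===== LEMMAS AND PROOFS =====

-- per-position step size
def pvStep (aLen bLen : Nat) (p : Char) : Nat := if p = 'a' then aLen else bLen

-- the offset list, recursively
def offList (aLen bLen : Nat) : List Char → Nat → List Nat
  | [], _ => []
  | p :: rest, i => i :: offList aLen bLen rest (i + pvStep aLen bLen p)

-- the offset of the last pattern position
def lastOff (aLen bLen : Nat) : List Char → Nat → Nat
  | [], i => i
  | [_], i => i
  | p :: q :: rest, i => lastOff aLen bLen (q :: rest) (i + pvStep aLen bLen p)

-- reference predicate: every position's guard holds and its chunk matches
def good (s : List Char) (aLen bLen : Nat) (aPat bPatG : List Char) : List Char → Nat → Bool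
  | [], _ => true
  | p :: rest, i =>
    decide (i < s.length) &&
    (if p = 'a' then decide (pyChunk s i aLen = aPat) else decide (pyChunk s i bLen = bPatG)) &&
    good s aLen bLen aPat bPatG rest (i + pvStep aLen bLen p)

-- chunk matches only (no guards)
def matchAll (s : List Char) (aLen bLen : Nat) (aPat bPatG : List Char) : List Char → Nat → Bool
  | [], _ => true
  | p :: rest, i =>
    (if p = 'a' then decide (pyChunk s i aLen = aPat) else decide (pyChunk s i bLen = bPatG)) &&
    matchAll s aLen bLen aPat bPatG rest (i + pvStep aLen bLen p)

theorem offsB_aux (aLen bLen : Nat) (q : List Char) :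
    ∀ (acc : List Nat) (a b : Nat),
    (q.foldl (fun (st : List Nat × Nat × Nat) p =>
      (st.1 ++ [aLen * st.2.1 + bLen * st.2.2],
       if p = 'a' then st.2.1 + 1 else st.2.1,
       if p = 'a' then st.2.2 else st.2.2 + 1)) (acc, a, b)).1
      = acc ++ offList aLen bLen q (aLen * a + bLen * b) := by
  induction q with
  | nil => simp [offList]
  | cons p rest ih =>
    intro acc a b
    by_cases hp : p = 'a' <;>
      simp [hp, List.foldl_cons, ih, offList, pvStep, Nat.mul_add, Nat.add_assoc, Nat.add_comm, Nat.add_left_comm]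
theorem offsB_eq_offList (aLen bLen : Nat) (q : List Char) :
    offsB aLen bLen q = offList aLen bLen q 0 := by
  have := offsB_aux aLen bLen q [] 0 0
  simpa [offsB] using this

theorem getLast?_offList (aLen bLen : Nat) (q : List Char) (i : Nat) (h : q ≠ []) :
    (offList aLen bLen q i).getLast? = some (lastOff aLen bLen q i) := by
  induction q generalizing i with
  | nil => simp at h
  | cons p rest ih =>
    cases rest with
    | nil => simp [offList, lastOff]
    | cons r rs =>
      have := ih (i := i + pvStep aLen bLen p) (by simp)
      simp [offList] at this ⊢
      simpa [lastOff] using this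

theorem le_lastOff (aLen bLen : Nat) (q : List Char) (i : Nat) : i ≤ lastOff aLen bLen q i := by
  induction q generalizing i with
  | nil => simp [lastOff]
  | cons p rest ih =>
    cases rest with
    | nil => simp [lastOff]
    | cons r rs =>
      calc i ≤ i + pvStep aLen bLen p := Nat.le_add_right _ _
        _ ≤ _ := ih _
theorem zip_all_eq_matchAll (s : List Char) (aLen bLen : Nat) (aPat bPatG : List Char)
    (q : List Char) (i : Nat) :
    ((q.zip (offList aLen bLen q i)).all fun po =>
        if po.1 = 'a' then decide (pyChunk s po.2 aLen = aPat) else decide (pyChunk s po.2 bLen = bPatG))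
      = matchAll s aLen bLen aPat bPatG q i := by
  induction q generalizing i with
  | nil => simp [offList, matchAll]
  | cons p rest ih => simp [offList, matchAll, ih]

theorem find?_zip_offList (aLen bLen : Nat) (q : List Char) (i : Nat) :
    ((q.zip (offList aLen bLen q i)).find? fun po => po.1 ≠ 'a')
      = match q.dropWhile (· = 'a') with
        | [] => none
        | p :: _ => some (p, i + aLen * (q.takeWhile (· = 'a')).length) := by
  induction q generalizing i with
  | nil => simp [offList]
  | cons p rest ih =>
    by_cases hp : p = 'a'
    · have := ih (i := i + pvStep aLen bLen p)
      simp [offList, List.find?, hp, pvStep] at this ⊢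
      rw [this]
      cases hdrop : rest.dropWhile (· = 'a') with
      | nil => simp
      | cons r rs => simp [Nat.mul_add, Nat.add_assoc, Nat.add_comm, Nat.add_left_comm]
    · simp [offList, List.find?, hp, List.dropWhile_cons, List.takeWhile_cons, pvStep]
theorem good_eq_guard_matchAll (s : List Char) (aLen bLen : Nat) (aPat bPatG : List Char)
    (q : List Char) (i : Nat) (h : q ≠ []) :
    good s aLen bLen aPat bPatG q i
      = (decide (lastOff aLen bLen q i < s.length) && matchAll s aLen bLen aPat bPatG q i) := by
  induction q generalizing i with
  | nil => simp at h
  | cons p rest ih =>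
    cases rest with
    | nil =>
      show (decide (i < s.length) && _ && good s aLen bLen aPat bPatG [] _) = _
      simp [good, matchAll, lastOff, Bool.and_comm]
      rfl
    | cons r rs =>
      have hle : i + pvStep aLen bLen p ≤ lastOff aLen bLen (r :: rs) (i + pvStep aLen bLen p) :=
        le_lastOff _ _ _ _
      have h1 : good s aLen bLen aPat bPatG (p :: r :: rs) i
          = (decide (i < s.length) &&
             ((if p = 'a' then decide (pyChunk s i aLen = aPat) else decide (pyChunk s i bLen = bPatG)) &&
              good s aLen bLen aPat bPatG (r :: rs) (i + pvStep aLen bLen p))) := by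
        show (_ && _ && _) = _
        rw [Bool.and_assoc]
      have h2 : matchAll s aLen bLen aPat bPatG (p :: r :: rs) i
          = ((if p = 'a' then decide (pyChunk s i aLen = aPat) else decide (pyChunk s i bLen = bPatG)) &&
             matchAll s aLen bLen aPat bPatG (r :: rs) (i + pvStep aLen bLen p)) := rfl
      have hlast : lastOff aLen bLen (p :: r :: rs) i
          = lastOff aLen bLen (r :: rs) (i + pvStep aLen bLen p) := rfl
      rw [h1, h2, ih _ (by simp), hlast]
      by_cases hL : lastOff aLen bLen (r :: rs) (i + pvStep aLen bLen p) < s.length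
      · have hi : i < s.length := lt_of_le_of_lt (le_trans (Nat.le_add_right _ _) hle) hL
        simp [hL, hi]
      · simp [hL]
theorem pyChunk_ne_nil (s : List Char) (i l : Nat) (hi : i < s.length) (hl : l ≠ 0) :
    pyChunk s i l ≠ [] := by
  simp [pyChunk, List.take_eq_nil_iff, List.drop_eq_nil_iff]
  omega

theorem loopA_eq_good (s : List Char) (aLen bLen : Nat) (aPat bPatG : List Char)
    (v : List Char) (i : Nat) (bPat : List Char) (hv : v ≠ [])
    (hz : bLen = 0 → bPat = [] ∧ bPatG = [])
    (hs : bLen ≠ 0 → (bPat = bPatG ∧ bPat ≠ []) ∨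
      (bPat = [] ∧ (match v.dropWhile (· = 'a') with
        | [] => True
        | _ :: _ => bPatG = pyChunk s (i + aLen * (v.takeWhile (· = 'a')).length) bLen))) :
    loopA s aLen bLen aPat v i bPat = good s aLen bLen aPat bPatG v i := by
  induction v generalizing i bPat with
  | nil => simp at hv
  | cons p rest ih =>
    by_cases hi : i < s.length
    · by_cases hp : p = 'a'
      · by_cases hm : pyChunk s i aLen = aPat
        · by_cases hrest : rest = []
          · subst hrest; simp [loopA, good, hi, hp, hm]
          · have hrec := ih (i := i + aLen) (bPat := bPat) hrest
              hz
              (by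
                intro hb
                rcases hs hb with h2 | ⟨h3, h4⟩
                · exact Or.inl h2
                · refine Or.inr ⟨h3, ?_⟩
                  rw [List.dropWhile_cons_of_pos (by simp [hp])] at h4
                  rw [List.takeWhile_cons_of_pos (by simp [hp])] at h4
                  revert h4
                  cases rest.dropWhile (· = 'a') with
                  | nil => simp
                  | cons x xs =>
                    simp only [List.length_cons]
                    intro h4
                    rw [h4]; ring_nf)
            simp [loopA, good, hi, hp, hm, hrest, pvStep, ← hrec]
        · simp [loopA, good, hi, hp, hm]
      · by_cases hb : bLen = 0
        · obtain ⟨hb1, hb2⟩ := hz hb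
          subst hb; subst hb1; subst hb2
          by_cases hrest : rest = []
          · subst hrest; simp [loopA, good, hi, hp, pyChunk]
          · have hrec := ih (i := i + 0) (bPat := []) hrest (by simp) (by simp)
            simp only [Nat.add_zero] at hrec
            simp [loopA, good, hi, hp, hrest, pvStep, pyChunk, ← hrec]
        · rcases hs hb with ⟨he, hne⟩ | ⟨hnil, hfb⟩
          · have hcond : ¬ (bLen ≠ 0 ∧ bPat = []) := by simp [hne]
            by_cases hm : pyChunk s i bLen = bPat
            · by_cases hrest : rest = []
              · subst hrest; simp [loopA, good, hi, hp, hcond, hm, he, he ▸ hm]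
              · have hrec := ih (i := i + bLen) (bPat := bPat) hrest
                  hz (fun _ => Or.inl ⟨he, hne⟩)
                simp [loopA, good, hi, hp, hcond, hm, he ▸ hm, hrest, pvStep, ← hrec, he]
            · have hm' : ¬ pyChunk s i bLen = bPatG := he ▸ hm
              simp [loopA, good, hi, hp, hcond, hm, hm']
          · have hdw : (p :: rest).dropWhile (· = 'a') = p :: rest :=
              List.dropWhile_cons_of_neg (by simp [hp])
            have htw : ((p :: rest).takeWhile (· = 'a')) = [] :=
              List.takeWhile_cons_of_neg (by simp [hp])
            have hG : bPatG = pyChunk s i bLen := by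
              rw [hdw] at hfb; simpa [htw] using hfb
            by_cases hrest : rest = []
            · subst hrest; simp [loopA, good, hi, hp, hb, hnil, ← hG]
            · have hrec := ih (i := i + bLen) (bPat := pyChunk s i bLen) hrest
                (fun h => absurd h hb)
                (fun _ => Or.inl ⟨hG.symm, pyChunk_ne_nil s i bLen hi hb⟩)
              simp [loopA, good, hi, hp, hb, hnil, ← hG, hrest, pvStep, ← hrec]
    · simp [loopA, good, hi]
theorem checkB_eq_good (s q : List Char) (aLen bLen : Nat) (h : q ≠ []) :
    checkB s q aLen bLen
      = good s aLen bLen (pyChunk s 0 aLen)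
          (match q.dropWhile (· = 'a') with
           | [] => []
           | _ :: _ => pyChunk s (aLen * (q.takeWhile (· = 'a')).length) bLen) q 0 := by
  have hL := getLast?_offList aLen bLen q 0 h
  have hF := find?_zip_offList aLen bLen q 0
  have hG := good_eq_guard_matchAll s aLen bLen (pyChunk s 0 aLen)
    (match q.dropWhile (· = 'a') with
     | [] => []
     | _ :: _ => pyChunk s (aLen * (q.takeWhile (· = 'a')).length) bLen) q 0 h
  rw [hG]
  cases hd : q.dropWhile (· = 'a') with
  | nil =>
    simp only [hd] at hF ⊢
    simp only [checkB, offsB_eq_offList, hL, hF, zip_all_eq_matchAll]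
    by_cases hlt : lastOff aLen bLen q 0 < s.length
    · simp [hlt, Nat.not_le.mpr hlt]
    · simp [hlt, Nat.le_of_not_lt hlt]
  | cons r rs =>
    simp only [hd] at hF ⊢
    simp only [checkB, offsB_eq_offList, hL, hF, zip_all_eq_matchAll]
    by_cases hlt : lastOff aLen bLen q 0 < s.length
    · simp [hlt, Nat.not_le.mpr hlt, zip_all_eq_matchAll]
    · simp [hlt, Nat.le_of_not_lt hlt]
theorem countsA_aux (q : List Char) : ∀ (x y : Nat),
    q.foldl (fun (c : Nat × Nat) p => if p = 'a' then (c.1 + 1, c.2) else (c.1, c.2 + 1)) (x, y)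
      = (x + q.count 'a', y + (q.length - q.count 'a')) := by
  induction q with
  | nil => simp
  | cons p rest ih =>
    intro x y
    have hc : rest.count 'a' ≤ rest.length := List.count_le_length
    by_cases hp : p = 'a' <;>
      simp [hp, List.count_cons, ih] <;> omega

theorem countsA_eq (q : List Char) :
    q.foldl (fun (c : Nat × Nat) p => if p = 'a' then (c.1 + 1, c.2) else (c.1, c.2 + 1)) (0, 0)
      = (q.count 'a', q.length - q.count 'a') := by
  simpa using countsA_aux q 0 0

theorem normalizeA_eq (p : List Char) : normalizeA p = normalizeB p := by
  unfold normalizeA normalizeB flipAcc flipB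
  rw [PySem.List.foldl_append_singleton_eq_map]
  simp

-- one pattern-length candidate: A's while-loop simulation agrees with B's closed-form check
theorem perLen (s q : List Char) (aLen bLen : Nat) (hq : q ≠ []) :
    loopA s aLen bLen (pyChunk s 0 aLen) q 0 [] = checkB s q aLen bLen := by
  rw [checkB_eq_good s q aLen bLen hq]
  apply loopA_eq_good s aLen bLen (pyChunk s 0 aLen) _ q 0 [] hq
  · intro hb
    refine ⟨rfl, ?_⟩
    cases hd : q.dropWhile (· = 'a') <;> simp [hd, pyChunk, hb]
  · intro _
    refine Or.inr ⟨rfl, ?_⟩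
    cases hd : q.dropWhile (· = 'a') <;> simp [hd]

theorem normalizeB_ne_nil (p : List Char) (h : p ≠ []) : normalizeB p ≠ [] := by
  unfold normalizeB flipB
  split <;> simp [h]

-- ===== VERDICT (by name: the statement is the Claim_ definition above) =====
theorem findMatchingPatterns_spec : Claim_equal_findMatchingPatterns := by
  intro string pattern _dom hpre
  unfold Spec_findMatchingPatterns findMatchingPatterns findMatchingPatterns_alt
  dsimp only
  rw [normalizeA_eq, countsA_eq]
  have hq : normalizeB pattern.toList ≠ [] := normalizeB_ne_nil _ hpre.1
  simp only
  congr 1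
  funext aLen
  exact perLen string.toList (normalizeB pattern.toList) aLen _ hq
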